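-- pv_equiv track=rewrite | github.com/KLKln/Module8 | more_fun_with_collections/assign_average.py | get_switch_value
-- ===== SOURCE A (Python) =====
-- def get_switch_value(list_of_scores):
--     """
-- Use reST style.
-- :param list_of_scores:
-- :return: letter_grade
-- raises keyError: raises an exception
--     """
--     for i in list_of_scores:
--         if int(i) >= 90:
--             letter_grade = 'A'
--         elif int(i) >= 80:
--             letter_grade = 'B'
--         elif int(i) >= 70:
--             letter_grade = 'C'
--         elif int(i) >= 60:
--             letter_grade = 'D'
--         elif 0 <= int(i) <= 59:
--             letter_grade = 'F'
--         else:
--             letter_grade = 'Not a viable score!'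
--
--         return letter_grade
-- ===== SOURCE B (Python) =====
-- def get_switch_value(list_of_scores):
--     for score in list_of_scores:
--         score = int(score)
--         if score < 0:
--             return 'Not a viable score!'
--         return 'FFFFFFDCBA'[min(score // 10, 9)]
-- ===== Notes on version B (the rewrite author's own statement) =====
-- stated objective: simpler
-- what changed: Replaces the five-way if/elif threshold chain with a single closed-form table lookup: index 'FFFFFFDCBA' at min(score // 10, 9), keeping only the negative-score branch.
-- outside the precondition, e.g. on get_switch_value([]): A returns None, B returns None
import Mathlib
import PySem

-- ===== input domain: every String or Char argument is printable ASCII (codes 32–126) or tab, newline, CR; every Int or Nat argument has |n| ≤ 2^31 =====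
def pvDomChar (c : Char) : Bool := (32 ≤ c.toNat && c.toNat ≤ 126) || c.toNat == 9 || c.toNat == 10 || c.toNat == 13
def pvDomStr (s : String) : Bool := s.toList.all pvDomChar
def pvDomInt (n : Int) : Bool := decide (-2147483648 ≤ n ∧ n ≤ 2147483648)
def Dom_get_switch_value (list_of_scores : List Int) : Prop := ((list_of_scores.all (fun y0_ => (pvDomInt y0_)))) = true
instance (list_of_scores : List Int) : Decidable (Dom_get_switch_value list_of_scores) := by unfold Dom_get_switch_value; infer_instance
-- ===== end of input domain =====

-- B replaces A's if/elif threshold chain by a closed-form table lookup 'FFFFFFDCBA'[min(score // 10, 9)] (objective: simpler).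

-- ===== PORT A =====
def get_switch_value (list_of_scores : List Int) : String :=
  match list_of_scores with
  | [] => ""          -- Python falls off the loop and returns None (not a str); excluded by Pre_
  | i :: _ =>
    if i ≥ 90 then "A"
    else if i ≥ 80 then "B"
    else if i ≥ 70 then "C"
    else if i ≥ 60 then "D"
    else if 0 ≤ i ∧ i ≤ 59 then "F"
    else "Not a viable score!"

-- ===== PORT B =====
def get_switch_value_alt (list_of_scores : List Int) : String :=
  match list_of_scores with
  | [] => ""          -- Python falls off the loop and returns None (not a str); excluded by Pre_
  | score :: _ =>
    if score < 0 then "Not a viable score!"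
    else
      -- 'FFFFFFDCBA'[min(score // 10, 9)]; the index is always in [0, 9] here, so pyGet? is some
      match PySem.Str.pyGet? "FFFFFFDCBA" (min (PySem.Int.floordiv score 10) 9) with
      | some c => String.ofList [c]
      | none => ""

-- ===== PRECONDITION & SPEC =====
-- Pre_ excludes only the empty list, on which Python A (and B) fall through the loop and return None, which is not a str.
def Pre_get_switch_value (list_of_scores : List Int) : Prop := list_of_scores ≠ []
instance (list_of_scores : List Int) : Decidable (Pre_get_switch_value list_of_scores) := by unfold Pre_get_switch_value; infer_instance
def pvWitness_get_switch_value : List Int := [85]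

def Spec_get_switch_value (list_of_scores : List Int) (out : String) : Prop := out = get_switch_value_alt list_of_scores
instance (list_of_scores : List Int) (out : String) : Decidable (Spec_get_switch_value list_of_scores out) := by unfold Spec_get_switch_value; infer_instance

-- ===== CLAIM =====
def Claim_equal_get_switch_value : Prop := ∀ (list_of_scores : List Int), Dom_get_switch_value list_of_scores → Pre_get_switch_value list_of_scores → Spec_get_switch_value list_of_scores (get_switch_value list_of_scores)

-- ===== LEMMAS AND PROOFS =====
theorem head_eq (s : Int) : get_switch_value [s] = get_switch_value_alt [s] := by
  unfold get_switch_value get_switch_value_alt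
  rcases lt_or_ge s 0 with hneg | hnn
  · simp [show ¬ s ≥ 90 by omega, show ¬ s ≥ 80 by omega, show ¬ s ≥ 70 by omega,
      show ¬ s ≥ 60 by omega, show ¬ (0 ≤ s ∧ s ≤ 59) by omega, hneg]
  · rcases lt_or_ge s 90 with h90 | h90
    · rcases lt_or_ge s 80 with h80 | h80
      · rcases lt_or_ge s 70 with h70 | h70
        · rcases lt_or_ge s 60 with h60 | h60
          · -- 0 ≤ s < 60 : grade F, index s / 10 ∈ [0,5]
            simp only [show ¬ s ≥ 90 by omega, show ¬ s ≥ 80 by omega,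
              show ¬ s ≥ 70 by omega, show ¬ s ≥ 60 by omega,
              show (0 ≤ s ∧ s ≤ 59) by omega, show ¬ s < 0 by omega,
              if_false, ite_true, ite_false, PySem.Int.floordiv_eq_ediv_of_pos (show (0:ℤ) < 10 by omega)]
            have hq0 : 0 ≤ s / 10 := by omega
            have hq6 : s / 10 < 6 := by omega
            rw [show min (s / 10) 9 = s / 10 by omega]
            set q := s / 10 with hq
            interval_cases q <;> decide
          · -- 60 ≤ s < 70 : index 6
            simp only [show ¬ s ≥ 90 by omega, show ¬ s ≥ 80 by omega,
              show ¬ s ≥ 70 by omega, show s ≥ 60 by omega, show ¬ s < 0 by omega,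
              if_false, ite_true, ite_false, PySem.Int.floordiv_eq_ediv_of_pos (show (0:ℤ) < 10 by omega)]
            rw [show min (s / 10) 9 = 6 by omega]; decide
        · -- 70 ≤ s < 80 : index 7
          simp only [show ¬ s ≥ 90 by omega, show ¬ s ≥ 80 by omega,
            show s ≥ 70 by omega, show ¬ s < 0 by omega,
            if_false, ite_true, ite_false, PySem.Int.floordiv_eq_ediv_of_pos (show (0:ℤ) < 10 by omega)]
          rw [show min (s / 10) 9 = 7 by omega]; decide
      · -- 80 ≤ s < 90 : index 8
        simp only [show ¬ s ≥ 90 by omega, show s ≥ 80 by omega, show ¬ s < 0 by omega,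
          if_false, ite_true, ite_false, PySem.Int.floordiv_eq_ediv_of_pos (show (0:ℤ) < 10 by omega)]
        rw [show min (s / 10) 9 = 8 by omega]; decide
    · -- s ≥ 90 : index min (s / 10) 9 = 9
      simp only [show s ≥ 90 by omega, show ¬ s < 0 by omega,
        if_false, ite_true, ite_false, PySem.Int.floordiv_eq_ediv_of_pos (show (0:ℤ) < 10 by omega)]
      rw [show min (s / 10) 9 = 9 by omega]; decide

-- ===== VERDICT =====
theorem get_switch_value_spec : Claim_equal_get_switch_value := by
  intro l _ hpre
  unfold Spec_get_switch_value
  match l with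
  | [] => exact absurd rfl hpre
  | s :: t =>
    show get_switch_value (s :: t) = get_switch_value_alt (s :: t)
    simpa [get_switch_value, get_switch_value_alt] using head_eq s
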